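-- pv_equiv track=rewrite | github.com/jakubsiwek/Python-Study | Podstawy programowania/Zad 6.py | count_ranges
-- ===== SOURCE A (Python) =====
-- def count_ranges(value1: int, value2: int, value3: int) -> int:
--     first_range_sum = 0
--     second_range_sum = 0
--     for i in range(value1, value2 + 1, 1):
--         first_range_sum += i
--     for j in range(value2, value3 + 1, 1):
--         second_range_sum += j
--     return first_range_sum if first_range_sum > second_range_sum else second_range_sum
-- ===== SOURCE B (Python) =====
-- def count_ranges(value1: int, value2: int, value3: int) -> int:
--     s1 = (value1 + value2) * (value2 - value1 + 1) // 2 if value1 <= value2 else 0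
--     s2 = (value2 + value3) * (value3 - value2 + 1) // 2 if value2 <= value3 else 0
--     return max(s1, s2)
-- ===== Notes on version B (the rewrite author's own statement) =====
-- stated objective: faster
-- what changed: Replaces the two summation loops by the arithmetic-series closed form (a+b)(b-a+1)//2 with an empty-range guard, and the conditional by max.
import Mathlib
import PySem

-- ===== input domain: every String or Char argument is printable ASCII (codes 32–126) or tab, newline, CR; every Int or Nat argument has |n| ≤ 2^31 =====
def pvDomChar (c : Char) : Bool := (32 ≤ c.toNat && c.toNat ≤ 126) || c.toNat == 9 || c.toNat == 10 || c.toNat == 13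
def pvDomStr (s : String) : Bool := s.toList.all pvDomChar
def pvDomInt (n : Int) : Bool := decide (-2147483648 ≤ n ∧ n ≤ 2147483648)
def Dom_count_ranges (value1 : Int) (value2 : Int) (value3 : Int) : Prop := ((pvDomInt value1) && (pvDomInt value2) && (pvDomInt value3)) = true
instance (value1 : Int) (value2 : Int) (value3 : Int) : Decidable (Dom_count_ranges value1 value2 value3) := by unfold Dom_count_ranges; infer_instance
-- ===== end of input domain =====

-- B replaces A's two summation loops by the closed-form arithmetic-series formula (O(1) instead of O(n)); same return value everywhere.

-- ===== PORT A =====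
def count_ranges (value1 : Int) (value2 : Int) (value3 : Int) : Int :=
  let first_range_sum : Int := (PySem.List.pyRange value1 (value2 + 1) 1).foldl (fun acc i => acc + i) 0
  let second_range_sum : Int := (PySem.List.pyRange value2 (value3 + 1) 1).foldl (fun acc j => acc + j) 0
  if first_range_sum > second_range_sum then first_range_sum else second_range_sum

-- ===== PORT B =====
def count_ranges_alt (value1 : Int) (value2 : Int) (value3 : Int) : Int :=
  let s1 : Int := if value1 ≤ value2 then PySem.Int.floordiv ((value1 + value2) * (value2 - value1 + 1)) 2 else 0
  let s2 : Int := if value2 ≤ value3 then PySem.Int.floordiv ((value2 + value3) * (value3 - value2 + 1)) 2 else 0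
  max s1 s2

-- ===== PRECONDITION & SPEC =====
def Spec_count_ranges (value1 : Int) (value2 : Int) (value3 : Int) (out : Int) : Prop := out = count_ranges_alt value1 value2 value3
instance (value1 : Int) (value2 : Int) (value3 : Int) (out : Int) : Decidable (Spec_count_ranges value1 value2 value3 out) := by unfold Spec_count_ranges; infer_instance

-- ===== CLAIM (what is proved, stated in full; the proofs are below) =====
def Claim_equal_count_ranges : Prop := ∀ (value1 : Int) (value2 : Int) (value3 : Int), Dom_count_ranges value1 value2 value3 → Spec_count_ranges value1 value2 value3 (count_ranges value1 value2 value3)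

-- ===== LEMMAS AND PROOFS =====

-- twice the foldl-sum of range(a, b) is (a+b-1)*(b-a)
theorem pv_twice_foldl_sum (n : Nat) : ∀ a b : Int, b - a = n →
    2 * (PySem.List.pyRange a b 1).foldl (fun acc i => acc + i) 0 = (a + b - 1) * (b - a) := by
  induction n with
  | zero =>
    intro a b h
    rw [PySem.List.pyRange_one_eq_nil (by omega)]
    simp [List.foldl]
    omega
  | succ k ih =>
    intro a b h
    have hb : b = (b - 1) + 1 := by omega
    rw [hb, PySem.List.pyRange_one_succ_right (by omega), List.foldl_append]
    simp only [List.foldl]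
    have := ih a (b - 1) (by omega)
    nlinarith [this]

theorem pv_sum_eq (a b : Int) :
    (PySem.List.pyRange a (b + 1) 1).foldl (fun acc i => acc + i) 0 =
      if a ≤ b then PySem.Int.floordiv ((a + b) * (b - a + 1)) 2 else 0 := by
  by_cases h : a ≤ b
  · simp only [h, if_true]
    have h2 := pv_twice_foldl_sum (b + 1 - a).toNat a (b + 1) (by omega)
    set S := (PySem.List.pyRange a (b + 1) 1).foldl (fun acc i => acc + i) 0 with hS
    have : (a + b) * (b - a + 1) = 2 * S := by nlinarith [h2]
    rw [this, PySem.Int.floordiv_eq_ediv_of_pos (by norm_num)]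
    omega
  · simp only [h, if_false]
    rw [PySem.List.pyRange_one_eq_nil (by omega)]
    simp [List.foldl]

-- ===== VERDICT (by name: the statement is the Claim_ definition above) =====
theorem count_ranges_spec : Claim_equal_count_ranges := by
  intro v1 v2 v3 _
  unfold Spec_count_ranges count_ranges count_ranges_alt
  rw [pv_sum_eq v1 v2, pv_sum_eq v2 v3]
  dsimp only
  simp only [max_def]
  split_ifs <;> omega
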